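-- pv_equiv track=rewrite | github.com/nrfconnect/sdk-sidewalk | scripts/ci/verify_formatting.py | split_files_for_languages
-- ===== SOURCE A (Python) =====
-- def split_files_for_languages(files):
--     return {
--         "source": [
--             f for f in files if f[-2:] == ".h" or f[-2:] == ".c"
--         ],
--         "python": [
--             f for f in files if f[-3:] == ".py"
--         ]
--     }
-- ===== SOURCE B (Python) =====
-- def split_files_for_languages(files):
--     source, python = [], []
--     for f in files:
--         if f.endswith(".h") or f.endswith(".c"):
--             source.append(f)
--         elif f.endswith(".py"):
--             python.append(f)
--     return {"source": source, "python": python}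
-- ===== Notes on version B (the rewrite author's own statement) =====
-- stated objective: simpler
-- what changed: Replaces A's two separate list-comprehension passes with slice comparisons by a single for-loop over the files that classifies each file once via str.endswith into two accumulators.
import Mathlib
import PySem

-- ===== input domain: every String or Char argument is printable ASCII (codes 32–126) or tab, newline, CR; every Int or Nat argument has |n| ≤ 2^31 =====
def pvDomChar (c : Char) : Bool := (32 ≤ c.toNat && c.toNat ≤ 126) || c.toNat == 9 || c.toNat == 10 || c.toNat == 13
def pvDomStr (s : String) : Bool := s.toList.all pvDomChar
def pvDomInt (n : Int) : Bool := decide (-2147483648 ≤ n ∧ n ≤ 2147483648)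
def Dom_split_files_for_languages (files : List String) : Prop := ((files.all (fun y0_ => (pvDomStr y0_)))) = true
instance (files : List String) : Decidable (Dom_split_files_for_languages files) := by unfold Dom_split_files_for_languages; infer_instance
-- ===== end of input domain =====

-- B: one single pass with two accumulators using str.endswith instead of A's two comprehension passes with slice comparisons (same return value; no argument mutation).
-- ===== PORT A =====
-- f[-2:] == ".h" ported as slice on the char list compared to the literal's char list (string equality = char-list equality; exact)
def split_files_for_languages (files : List String) : List (String × List String) :=
  [("source", files.filter (fun f =>
      (PySem.List.slice f.toList (some (-2)) none == ".h".toList) ||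
      (PySem.List.slice f.toList (some (-2)) none == ".c".toList))),
   ("python", files.filter (fun f =>
      PySem.List.slice f.toList (some (-3)) none == ".py".toList))]

-- ===== PORT B =====
def altStep (acc : List String × List String) (f : String) : List String × List String :=
  if PySem.Str.endswith f ".h" || PySem.Str.endswith f ".c" then (acc.1 ++ [f], acc.2)
  else if PySem.Str.endswith f ".py" then (acc.1, acc.2 ++ [f])
  else acc

def split_files_for_languages_alt (files : List String) : List (String × List String) :=
  let sp := files.foldl altStep ([], [])
  [("source", sp.1), ("python", sp.2)]

-- ===== PRECONDITION & SPEC =====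
def Spec_split_files_for_languages (files : List String) (out : List (String × List String)) : Prop := out = split_files_for_languages_alt files
instance (files : List String) (out : List (String × List String)) : Decidable (Spec_split_files_for_languages files out) := by unfold Spec_split_files_for_languages; infer_instance

-- ===== CLAIM (what is proved, stated in full; the proofs are below) =====
def Claim_equal_split_files_for_languages : Prop := ∀ (files : List String), Dom_split_files_for_languages files → Spec_split_files_for_languages files (split_files_for_languages files)

-- ===== LEMMAS AND PROOFS =====

-- ===== VERDICT (by name: the statement is the Claim_ definition above) =====
-- the slice test of A equals the endswith test of B
theorem drop_eq_endswith (f suf : String) (k : Nat) (hl : suf.toList.length = k) :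
    (f.toList.drop (f.toList.length - k) == suf.toList) = PySem.Str.endswith f suf := by
  subst hl
  rw [PySem.Str.endswith_eq]
  apply Bool.eq_iff_iff.mpr
  rw [beq_iff_eq, PySem.Chars.endswith_iff]
  constructor
  · intro hd; exact List.suffix_iff_eq_drop.mpr hd.symm
  · intro hs; exact (List.suffix_iff_eq_drop.mp hs).symm

-- a file cannot end in ".py" and also in ".h"/".c"
theorem not_both (f : String) (h1 : (PySem.Str.endswith f ".h" || PySem.Str.endswith f ".c") = true) :
    PySem.Str.endswith f ".py" = false := by
  by_contra hne
  simp only [Bool.not_eq_false, PySem.Str.endswith_eq] at hne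
  have h3 : ".py".toList <:+ f.toList := (PySem.Chars.endswith_iff _ _).mp hne
  rcases Bool.or_eq_true_iff.mp h1 with h2 | h2 <;>
  · rw [PySem.Str.endswith_eq] at h2
    have hsf := (PySem.Chars.endswith_iff _ _).mp h2
    rcases List.suffix_or_suffix_of_suffix hsf h3 with hc | hc
    · revert hc; decide
    · have := hc.length_le; simp at this

theorem foldl_altStep (files : List String) (s p : List String) :
    files.foldl altStep (s, p) =
      (s ++ files.filter (fun f => PySem.Str.endswith f ".h" || PySem.Str.endswith f ".c"),
       p ++ files.filter (fun f => PySem.Str.endswith f ".py")) := by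
  induction files generalizing s p with
  | nil => simp
  | cons f rest ih =>
    simp only [List.foldl_cons, List.filter_cons, altStep]
    by_cases h1 : (PySem.Str.endswith f ".h" || PySem.Str.endswith f ".c") = true
    · rw [if_pos h1, ih, h1, not_both f h1]
      simp
    · rw [if_neg h1, Bool.not_eq_true] at *
      rw [h1]
      by_cases h2 : PySem.Str.endswith f ".py" = true
      · rw [if_pos h2, ih, h2]; simp
      · rw [if_neg h2, Bool.not_eq_true] at *
        rw [h2, ih]; simp

theorem split_files_for_languages_spec : Claim_equal_split_files_for_languages := by
  intro files _
  show split_files_for_languages files = split_files_for_languages_alt files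
  have h1 : files.filter (fun f =>
      (PySem.List.slice f.toList (some (-2)) none == ".h".toList) ||
      (PySem.List.slice f.toList (some (-2)) none == ".c".toList)) =
      files.filter (fun f => PySem.Str.endswith f ".h" || PySem.Str.endswith f ".c") := by
    apply List.filter_congr; intro f _
    rw [PySem.List.slice_from_neg_ofNat f.toList 2 (by omega),
        drop_eq_endswith f ".h" 2 (by decide), drop_eq_endswith f ".c" 2 (by decide)]
  have h2 : files.filter (fun f => PySem.List.slice f.toList (some (-3)) none == ".py".toList) =
      files.filter (fun f => PySem.Str.endswith f ".py") := by
    apply List.filter_congr; intro f _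
    rw [PySem.List.slice_from_neg_ofNat f.toList 3 (by omega),
        drop_eq_endswith f ".py" 3 (by decide)]
  simp only [split_files_for_languages, split_files_for_languages_alt, foldl_altStep,
    List.nil_append, h1, h2]
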